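-- pv_equiv track=rewrite | github.com/koii-network/prometheus-beta | src/sequence_reconstruction.py | min_sequence_reconstruction
-- ===== SOURCE A (Python) =====
-- def min_sequence_reconstruction(original, current):
--     """
--     Determine the minimum number of insertions and removals required to
--     reconstruct the original sequence from the current sequence.
--
--     Args:
--         original (list): The target original sequence.
--         current (list): The current sequence to be transformed.
--
--     Returns:
--         int: The minimum number of insertions and removals needed.
--
--     Raises:
--         ValueError: If input is not a list or inputs are None.
--     """
--     # Validate inputs
--     if original is None or current is None:
--         raise ValueError("Input sequences cannot be None")
--
--     if not isinstance(original, list) or not isinstance(current, list):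
--         raise ValueError("Inputs must be lists")
--
--     # If either list is empty, return the length of the other list
--     if not original:
--         return len(current)
--     if not current:
--         return len(original)
--
--     # Count element frequencies in both lists
--     from collections import Counter
--     original_freq = Counter(original)
--     current_freq = Counter(current)
--
--     # Calculate removals (elements to remove from current)
--     removals = 0
--     current_copy = current_freq.copy()
--     for elem, count in original_freq.items():
--         if elem not in current_copy or current_copy[elem] < count:
--             # Need to either remove extra elements or add missing elements
--             if elem in current_copy:
--                 removals += current_copy[elem] - count
--             else:
--                 # If element is missing, we'll count it as removal
--                 removals += current_copy.get(elem, 0)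
--
--     # Calculate insertions (missing elements)
--     insertions = 0
--     current_copy = current_freq.copy()
--     for elem, count in original_freq.items():
--         if elem not in current_copy or current_copy[elem] < count:
--             if elem in current_copy:
--                 insertions += count - current_copy[elem]
--             else:
--                 insertions += count
--
--     return removals + insertions
-- ===== SOURCE B (Python) =====
-- def min_sequence_reconstruction(original, current):
--     """Single-pass rewrite: the answer is the number of elements of `original`
--     whose value never occurs in `current` (the removal/insertion terms of the
--     two-loop version cancel for every shared value)."""
--     if original is None or current is None:
--         raise ValueError("Input sequences cannot be None")
--     if not isinstance(original, list) or not isinstance(current, list):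
--         raise ValueError("Inputs must be lists")
--     if not original:
--         return len(current)
--     cur = set(current)
--     return sum(1 for x in original if x not in cur)
-- ===== Notes on version B (the rewrite author's own statement) =====
-- stated objective: simpler
-- what changed: Replaced the two Counter-frequency passes (whose removal/insertion terms cancel for every value present in current) by one membership scan of original against set(current), counting elements whose value is absent; both Counters and the removals loop disappear.
import Mathlib
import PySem

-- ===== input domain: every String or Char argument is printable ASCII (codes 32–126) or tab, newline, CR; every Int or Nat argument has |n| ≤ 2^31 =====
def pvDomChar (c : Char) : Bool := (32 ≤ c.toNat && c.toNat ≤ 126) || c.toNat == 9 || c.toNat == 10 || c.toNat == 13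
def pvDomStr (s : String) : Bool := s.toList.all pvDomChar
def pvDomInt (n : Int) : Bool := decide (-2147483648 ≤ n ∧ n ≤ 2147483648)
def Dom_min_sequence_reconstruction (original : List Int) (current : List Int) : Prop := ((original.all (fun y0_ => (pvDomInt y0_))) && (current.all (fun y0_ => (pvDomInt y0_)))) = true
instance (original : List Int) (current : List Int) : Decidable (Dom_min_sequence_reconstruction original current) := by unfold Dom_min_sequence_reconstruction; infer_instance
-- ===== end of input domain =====

-- B replaces A's two Counter-difference loops (whose terms cancel on shared values)
-- by one membership count of `original` against set(current); objective: simpler.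

-- ===== PORT A =====
def min_sequence_reconstruction (original : List Int) (current : List Int) : Int :=
  if original = [] then (current.length : Int)
  else if current = [] then (original.length : Int)
  else
    let original_freq := PySem.Dict.counter original
    let current_freq := PySem.Dict.counter current
    let removals := original_freq.items.foldl (fun removals p =>
      if ¬ (current_freq.contains p.1 = true) ∨ current_freq.getD p.1 0 < p.2 then
        if current_freq.contains p.1 = true then removals + (current_freq.getD p.1 0 - p.2)
        else removals + current_freq.getD p.1 0
      else removals) 0
    let insertions := original_freq.items.foldl (fun insertions p =>
      if ¬ (current_freq.contains p.1 = true) ∨ current_freq.getD p.1 0 < p.2 then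
        if current_freq.contains p.1 = true then insertions + (p.2 - current_freq.getD p.1 0)
        else insertions + p.2
      else insertions) 0
    removals + insertions

-- ===== PORT B =====
def min_sequence_reconstruction_alt (original : List Int) (current : List Int) : Int :=
  if original = [] then (current.length : Int)
  else
    let cur := PySem.Set.ofList current
    ((original.countP (fun x => !(PySem.Set.contains cur x))) : Int)

-- ===== PRECONDITION & SPEC =====
def Spec_min_sequence_reconstruction (original : List Int) (current : List Int) (out : Int) : Prop := out = min_sequence_reconstruction_alt original current
instance (original : List Int) (current : List Int) (out : Int) : Decidable (Spec_min_sequence_reconstruction original current out) := by unfold Spec_min_sequence_reconstruction; infer_instance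

-- ===== CLAIM (what is proved, stated in full; the proofs are below) =====
def Claim_equal_min_sequence_reconstruction : Prop := ∀ (original : List Int) (current : List Int), Dom_min_sequence_reconstruction original current → Spec_min_sequence_reconstruction original current (min_sequence_reconstruction original current)

-- ===== LEMMAS AND PROOFS =====

-- a 0/ite-sum over a nodup list picks out the single matching element
lemma pv_sum_ite_eq (S : List Int) (hnd : S.Nodup) (a : Int) (ha : a ∈ S) (t : Int) :
    (S.map (fun k => if a = k then t else 0)).sum = t := by
  induction S with
  | nil => cases ha
  | cons s rest ih =>
    rcases List.nodup_cons.mp hnd with ⟨hs, hrest⟩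
    by_cases h : a = s
    · subst h
      have hz : (rest.map (fun k => if a = k then t else 0)).sum = 0 := by
        apply List.sum_eq_zero
        intro x hx
        rcases List.mem_map.mp hx with ⟨k, hk, rfl⟩
        have : ¬ a = k := fun h' => hs (h' ▸ hk)
        simp [this]
      simp [hz]
    · cases ha with
      | head => exact absurd rfl h
      | tail _ ha => simp [h, ih hrest ha]

-- countP over a list equals the weighted sum of counts over any nodup value list covering it
lemma pv_countP_eq_sum (l : List Int) (S : List Int) (p : Int → Prop) [DecidablePred p]
    (hnd : S.Nodup) (hsub : ∀ x ∈ l, x ∈ S) :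
    (S.map (fun k => if p k then (l.count k : Int) else 0)).sum
      = ((l.countP (fun x => decide (p x))) : Int) := by
  induction l with
  | nil => simp
  | cons a xs ih =>
    have ha : a ∈ S := hsub a (List.mem_cons_self)
    have hsub' : ∀ x ∈ xs, x ∈ S := fun x hx => hsub x (List.mem_cons_of_mem _ hx)
    have hsplit : ∀ k ∈ S,
        (if p k then ((a :: xs).count k : Int) else 0)
          = (if p k then (xs.count k : Int) else 0) + (if a = k then (if p a then 1 else 0) else 0) := by
      intro k _
      by_cases hak : a = k
      · subst hak
        by_cases hp : p a <;> simp [hp, List.count_cons_self]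
      · have hka : ¬ k = a := fun h => hak h.symm
        by_cases hp : p k <;> simp [hp, hak]
    rw [List.map_congr_left hsplit, List.sum_map_add]
    rw [ih hsub', pv_sum_ite_eq S hnd a ha]
    by_cases hp : p a <;> simp [hp]

-- a foldl that only accumulates additions is the sum of its per-element contributions
lemma pv_foldl_sum (l : List (Int × Int)) (f : Int → Int × Int → Int) (F : Int × Int → Int)
    (hf : ∀ acc p, p ∈ l → f acc p = acc + F p) :
    ∀ init : Int, l.foldl f init = init + (l.map F).sum := by
  induction l with
  | nil => intro init; simp
  | cons a xs ih =>
    intro init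
    have ha := hf init a List.mem_cons_self
    simp only [List.foldl_cons, ha, List.map_cons, List.sum_cons]
    rw [ih (fun acc p hp => hf acc p (List.mem_cons_of_mem _ hp))]
    ring

theorem min_sequence_reconstruction_spec : Claim_equal_min_sequence_reconstruction := by
  intro original current _
  unfold Spec_min_sequence_reconstruction min_sequence_reconstruction min_sequence_reconstruction_alt
  by_cases ho : original = []
  · simp [ho]
  · rw [if_neg ho, if_neg ho]
    by_cases hc : current = []
    · subst hc
      simp [PySem.Set.ofList, PySem.Set.contains]
    · rw [if_neg hc]
      simp only []
      rw [pv_foldl_sum _ _ (fun p => if ¬ ((PySem.Dict.counter current).contains p.1 = true) ∨ (PySem.Dict.counter current).getD p.1 0 < p.2 then (if (PySem.Dict.counter current).contains p.1 = true then (PySem.Dict.counter current).getD p.1 0 - p.2 else (PySem.Dict.counter current).getD p.1 0) else 0) (by intro acc p _; beta_reduce; split_ifs <;> ring) 0,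
          pv_foldl_sum _ _ (fun p => if ¬ ((PySem.Dict.counter current).contains p.1 = true) ∨ (PySem.Dict.counter current).getD p.1 0 < p.2 then (if (PySem.Dict.counter current).contains p.1 = true then p.2 - (PySem.Dict.counter current).getD p.1 0 else p.2) else 0) (by intro acc p _; beta_reduce; split_ifs <;> ring) 0]
      simp only [zero_add]
      rw [← List.sum_map_add, PySem.Dict.items_counter, List.map_map]
      have hcongr : ∀ k ∈ PySem.Set.ofList original,
          ((fun p : Int × Int =>
              (if ¬ ((PySem.Dict.counter current).contains p.1 = true) ∨ (PySem.Dict.counter current).getD p.1 0 < p.2 then (if (PySem.Dict.counter current).contains p.1 = true then (PySem.Dict.counter current).getD p.1 0 - p.2 else (PySem.Dict.counter current).getD p.1 0) else 0)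
              + (if ¬ ((PySem.Dict.counter current).contains p.1 = true) ∨ (PySem.Dict.counter current).getD p.1 0 < p.2 then (if (PySem.Dict.counter current).contains p.1 = true then p.2 - (PySem.Dict.counter current).getD p.1 0 else p.2) else 0)) ∘
            (fun k => (k, (original.count k : Int)))) k
          = (fun k => if (¬ k ∈ current : Prop) then (original.count k : Int) else 0) k := by
        intro k _
        simp only [Function.comp_apply]
        have hgd : (PySem.Dict.counter current).getD k 0 = (current.count k : Int) :=
          PySem.Dict.getD_counter current k
        by_cases hk : k ∈ current
        · have hct : (PySem.Dict.counter current).contains k = true := by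
            rw [PySem.Dict.contains_counter]; simp [hk]
          rw [hct, hgd]
          have hnk : ¬ (¬ k ∈ current : Prop) := not_not_intro hk
          rw [if_neg hnk]
          simp only [not_true, false_or, ite_true]
          split_ifs <;> ring
        · have hc0 : current.count k = 0 := List.count_eq_zero.mpr hk
          have hct : (PySem.Dict.counter current).contains k = false := by
            rw [PySem.Dict.contains_counter]; simp [hk]
          rw [hct, hgd, hc0]
          simp [hk]
      rw [List.map_congr_left hcongr]
      rw [pv_countP_eq_sum original (PySem.Set.ofList original) (fun k => ¬ k ∈ current)
        (PySem.Set.nodup_ofList original) (fun x hx => (PySem.Set.mem_ofList original x).mpr hx)]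
      norm_cast
      apply List.countP_congr
      intro x _
      simp [PySem.Set.contains, PySem.Set.mem_ofList]
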